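-- pv_equiv track=rewrite | github.com/KatKofil/sese | Tp1/toycipher.py | parite
-- ===== SOURCE A (Python) =====
-- sbox = [9, 0xb, 0xc, 4, 0xa, 1, 2, 6, 0xd, 7, 3, 8, 0xf, 0xe, 0, 5]
--
-- def parite(pair_mask):
-- 	res = []
-- 	for i in pair_mask:
-- 		res.append(0)
-- 		for j in range(0,16):
-- 			mask = pair_mask[i]
-- 			res_in = bin(j & mask[0]).count('1')
-- 			res_out = bin(sbox[j] & mask[1]).count('1')
-- 			if res_in %2 == res_out %2:
-- 				res[i] = res[i] +1
-- 	return res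
-- ===== SOURCE B (Python) =====
-- sbox = [9, 0xb, 0xc, 4, 0xa, 1, 2, 6, 0xd, 7, 3, 8, 0xf, 0xe, 0, 5]
--
-- def parite(pair_mask):
--     # precompute parity of each nibble, then the full 16x16 linear-approximation table
--     pbit = [bin(v).count('1') % 2 for v in range(16)]
--     lat = [[len([j for j in range(16) if pbit[j & a] == pbit[sbox[j] & b]])
--             for b in range(16)]
--            for a in range(16)]
--     res = []
--     for i in pair_mask:
--         m = pair_mask[i]
--         res.append(0)
--         res[i] = res[i] + lat[m[0] % 16][m[1] % 16]
--     return res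
-- ===== Notes on version B (the rewrite author's own statement) =====
-- stated objective: faster
-- what changed: B precomputes the 16x16 linear-approximation table (and a nibble-parity table) once up front, so each dict entry is answered by a single table lookup at (mask0 % 16, mask1 % 16) instead of A's per-entry 16-iteration scan that rebuilds bin().count('1') parities every time.
import Mathlib
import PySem

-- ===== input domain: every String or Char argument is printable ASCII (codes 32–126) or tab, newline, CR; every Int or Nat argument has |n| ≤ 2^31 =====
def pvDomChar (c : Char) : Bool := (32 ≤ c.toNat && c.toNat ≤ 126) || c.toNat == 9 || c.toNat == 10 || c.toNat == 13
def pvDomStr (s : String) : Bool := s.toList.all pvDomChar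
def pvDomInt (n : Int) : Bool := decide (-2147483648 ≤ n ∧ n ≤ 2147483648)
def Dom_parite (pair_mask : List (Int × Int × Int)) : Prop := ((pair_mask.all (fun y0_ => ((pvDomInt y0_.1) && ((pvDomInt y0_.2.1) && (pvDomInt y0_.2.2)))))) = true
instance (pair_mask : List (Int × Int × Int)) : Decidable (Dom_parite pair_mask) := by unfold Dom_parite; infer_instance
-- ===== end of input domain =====

-- B replaces A's per-entry 16-iteration parity scan by a precomputed 16×16 linear-approximation
-- table indexed by the masks reduced mod 16 (objective: faster — one lookup per entry instead of
-- a 16-step scan; a timing run could not measure large inputs, so this speed is unverified).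

-- ===== PORT A =====
def sboxL : List Int := [9, 11, 12, 4, 10, 1, 2, 6, 13, 7, 3, 8, 15, 14, 0, 5]

-- pair_mask[i]: Python dict lookup (keys unique under Pre_, so first match; default unreachable —
-- i is always drawn from pair_mask's own keys)
def pmGet (pm : List (Int × Int × Int)) (i : Int) : Int × Int :=
  match pm.find? (fun p => p.1 == i) with
  | some p => p.2
  | none => (0, 0)

-- bin(x).count('1') is PySem.Int.bitCount (exact also for x < 0: bin prints '-0b…', '1's = bits of |x|)
def parite (pair_mask : List (Int × Int × Int)) : List Int :=
  pair_mask.foldl (fun res kv =>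
    let res := res ++ [(0 : Int)]
    (PySem.List.pyRange 0 16 1).foldl (fun res j =>
      let mask := pmGet pair_mask kv.1
      let res_in : Int := (PySem.Int.bitCount (PySem.Int.band j mask.1) : Int)
      let res_out : Int := (PySem.Int.bitCount (PySem.Int.band (PySem.List.pyGetD sboxL j 0) mask.2) : Int)
      if PySem.Int.mod res_in 2 == PySem.Int.mod res_out 2
      then PySem.List.pySetD res kv.1 (PySem.List.pyGetD res kv.1 0 + 1)
      else res) res) []

-- ===== PORT B =====
def parite_alt (pair_mask : List (Int × Int × Int)) : List Int :=
  let pbit := (PySem.List.pyRange 0 16 1).map (fun v => PySem.Int.mod (PySem.Int.bitCount v : Int) 2)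
  let lat := (PySem.List.pyRange 0 16 1).map (fun a =>
    (PySem.List.pyRange 0 16 1).map (fun b =>
      (((PySem.List.pyRange 0 16 1).filter (fun j =>
        PySem.List.pyGetD pbit (PySem.Int.band j a) 0
          == PySem.List.pyGetD pbit (PySem.Int.band (PySem.List.pyGetD sboxL j 0) b) 0)).length : Int)))
  pair_mask.foldl (fun res kv =>
    let m := pmGet pair_mask kv.1
    let res := res ++ [(0 : Int)]
    PySem.List.pySetD res kv.1
      (PySem.List.pyGetD res kv.1 0 +
        PySem.List.pyGetD (PySem.List.pyGetD lat (PySem.Int.mod m.1 16) []) (PySem.Int.mod m.2 16) 0)) []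

-- ===== PRECONDITION & SPEC =====
-- Pre_ excludes (a) inputs where A raises IndexError (a key outside the window [-(t+1), t] at its
-- position t), and (b) association lists with duplicate keys, which do not represent a Python dict
-- (dict keys are unique; a duplicate-key list is an ambiguous encoding).
def Pre_parite (pair_mask : List (Int × Int × Int)) : Prop :=
  (pair_mask.map (·.1)).Nodup ∧
  ∀ t, (h : t < pair_mask.length) → PySem.Raise.InRange (t + 1) (pair_mask[t].1)
instance (pair_mask : List (Int × Int × Int)) : Decidable (Pre_parite pair_mask) := by
  unfold Pre_parite; infer_instance

def pvWitness_parite : (List (Int × Int × Int)) := [(0, 1, 2), (1, 3, 4)]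

def Spec_parite (pair_mask : List (Int × Int × Int)) (out : List Int) : Prop := out = parite_alt pair_mask
instance (pair_mask : List (Int × Int × Int)) (out : List Int) : Decidable (Spec_parite pair_mask out) := by unfold Spec_parite; infer_instance

-- ===== CLAIM (what is proved, stated in full; the proofs are below) =====
def Claim_equal_parite : Prop := ∀ (pair_mask : List (Int × Int × Int)), Dom_parite pair_mask → Pre_parite pair_mask → Spec_parite pair_mask (parite pair_mask)

-- ===== LEMMAS AND PROOFS =====

-- low 4 bits: j &&& m only sees m's low nibble when j < 16
lemma nat_and_mod16 (j m : Nat) (hj : j < 16) : j &&& m = j &&& (m % 16) := by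
  apply Nat.eq_of_testBit_eq
  intro i
  rcases lt_or_ge i 4 with h | h
  · have hm := Nat.testBit_mod_two_pow m 4 i
    rw [show (2 ^ 4 : Nat) = 16 from rfl] at hm
    simp [Nat.testBit_and, hm, h]
  · have hjb : j.testBit i = false := by
      refine Nat.testBit_lt_two_pow (lt_of_lt_of_le hj ?_)
      calc (16 : Nat) = 2 ^ 4 := rfl
        _ ≤ 2 ^ i := Nat.pow_le_pow_right (by norm_num) h
    simp [Nat.testBit_and, hjb]

lemma nibble_sub_and : ∀ j < 16, ∀ r < 16, j - (j &&& r) = j &&& (15 - r) := by decide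

-- the masks enter A's computation only mod 16
lemma band_mod16 (j m : Int) (hj0 : 0 ≤ j) (hj : j < 16) :
    PySem.Int.band j m = PySem.Int.band j (PySem.Int.mod m 16) := by
  have hm16 : PySem.Int.mod m 16 = m % 16 := PySem.Int.mod_eq_emod_of_pos (by norm_num)
  have hr0 : 0 ≤ m % 16 := Int.emod_nonneg m (by norm_num)
  have hr : m % 16 < 16 := Int.emod_lt_of_pos m (by norm_num)
  rw [hm16]
  by_cases hm : 0 ≤ m
  · rw [PySem.Int.band_of_nonneg hj0 hm, PySem.Int.band_of_nonneg hj0 hr0]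
    have h1 : (m % 16).toNat = m.toNat % 16 := by omega
    rw [h1, ← nat_and_mod16 _ _ (by omega)]
  · have hlhs : PySem.Int.band j m = ((j.toNat - (j.toNat &&& (-m - 1).toNat) : Nat) : Int) := by
      unfold PySem.Int.band
      rw [if_pos hj0, if_neg hm]
    rw [hlhs, PySem.Int.band_of_nonneg hj0 hr0]
    have hd : (m % 16).toNat = 15 - ((-m - 1).toNat % 16) := by omega
    have hc : (-m - 1).toNat % 16 < 16 := by omega
    rw [hd, nat_and_mod16 _ _ (by omega : j.toNat < 16),
      nibble_sub_and j.toNat (by omega) _ hc]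

-- sbox values for an index in range(16) lie in [0, 16)
lemma sbox_range (j : Int) (h0 : 0 ≤ j) (h1 : j < 16) :
    0 ≤ PySem.List.pyGetD sboxL j 0 ∧ PySem.List.pyGetD sboxL j 0 < 16 := by
  interval_cases j <;> decide

lemma pyIdx?_of_inRange {n : Nat} {i : Int} (h : PySem.Raise.InRange n i) :
    ∃ k, PySem.List.pyIdx? n i = some k ∧ k < n := by
  obtain ⟨h1, h2⟩ := h
  unfold PySem.List.pyIdx?
  split_ifs <;>
    first
      | exact ⟨i.toNat, rfl, by omega⟩
      | exact ⟨n - (-i).toNat, rfl, by omega⟩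

lemma pyGetD_eq_getElem_idx {r : List Int} {i : Int} {k : Nat} (d : Int)
    (hk : PySem.List.pyIdx? r.length i = some k) (hkl : k < r.length) :
    PySem.List.pyGetD r i d = r[k] := by
  simp [PySem.List.pyGetD, PySem.List.pyGet?, hk, List.getElem?_eq_getElem hkl]

lemma pySetD_eq_set_idx {r : List Int} {i : Int} {k : Nat} (v : Int)
    (hk : PySem.List.pyIdx? r.length i = some k) :
    PySem.List.pySetD r i v = r.set k v := by
  simp [PySem.List.pySetD, PySem.List.pySet?, hk]

-- set/get identities at one (possibly negative) Python index
lemma pySetD_get_self (r : List Int) (i : Int) (d : Int) (h : PySem.Raise.InRange r.length i) :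
    PySem.List.pySetD r i (PySem.List.pyGetD r i d) = r := by
  obtain ⟨k, hk, hkl⟩ := pyIdx?_of_inRange h
  rw [pyGetD_eq_getElem_idx d hk hkl, pySetD_eq_set_idx _ hk, List.set_getElem_self]

lemma pyGetD_pySetD_self (r : List Int) (i : Int) (v d : Int) (h : PySem.Raise.InRange r.length i) :
    PySem.List.pyGetD (PySem.List.pySetD r i v) i d = v := by
  obtain ⟨k, hk, hkl⟩ := pyIdx?_of_inRange h
  rw [pySetD_eq_set_idx _ hk,
    pyGetD_eq_getElem_idx d (by rw [List.length_set]; exact hk) (by simpa using hkl),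
    List.getElem_set_self]

lemma pySetD_pySetD_self (r : List Int) (i : Int) (v w : Int) (h : PySem.Raise.InRange r.length i) :
    PySem.List.pySetD (PySem.List.pySetD r i v) i w = PySem.List.pySetD r i w := by
  obtain ⟨k, hk, hkl⟩ := pyIdx?_of_inRange h
  rw [pySetD_eq_set_idx v hk, pySetD_eq_set_idx w (by rw [List.length_set]; exact hk),
    pySetD_eq_set_idx w hk, List.set_set]

-- A's inner loop: 'for j in L: if p(j): res[i] += 1' adds the count of satisfying j's to res[i]
lemma foldl_count_set (i : Int) (p : Int → Bool) :
    ∀ (L : List Int) (r : List Int), PySem.Raise.InRange r.length i →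
      L.foldl (fun s j => if p j then PySem.List.pySetD s i (PySem.List.pyGetD s i 0 + 1) else s) r
        = PySem.List.pySetD r i (PySem.List.pyGetD r i 0 + (L.countP p : Int))
  | [], r, h => by simpa using (pySetD_get_self r i 0 h).symm
  | j :: L, r, h => by
    simp only [List.foldl_cons]
    by_cases hp : p j
    · rw [if_pos hp,
        foldl_count_set i p L _ (by rw [PySem.List.length_pySetD]; exact h),
        pyGetD_pySetD_self r i _ 0 h, pySetD_pySetD_self r i _ _ h]
      congr 1
      have hc : ((j :: L).countP p : Int) = (L.countP p : Int) + 1 := by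
        simp [hp]
      rw [hc]; ring
    · rw [if_neg hp, foldl_count_set i p L r h]
      have hc : ((j :: L).countP p : Int) = (L.countP p : Int) := by
        simp [hp]
      rw [hc]

-- B's tables, named for the proofs (definitionally the let-bound lists inside parite_alt)
def pbitT : List Int :=
  (PySem.List.pyRange 0 16 1).map (fun v => PySem.Int.mod (PySem.Int.bitCount v : Int) 2)

def latT : List (List Int) :=
  (PySem.List.pyRange 0 16 1).map (fun a =>
    (PySem.List.pyRange 0 16 1).map (fun b =>
      (((PySem.List.pyRange 0 16 1).filter (fun j =>
        PySem.List.pyGetD pbitT (PySem.Int.band j a) 0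
          == PySem.List.pyGetD pbitT (PySem.Int.band (PySem.List.pyGetD sboxL j 0) b) 0)).length : Int)))

-- A's per-j test, named
def condP (m : Int × Int) (j : Int) : Bool :=
  PySem.Int.mod (PySem.Int.bitCount (PySem.Int.band j m.1) : Int) 2
    == PySem.Int.mod (PySem.Int.bitCount (PySem.Int.band (PySem.List.pyGetD sboxL j 0) m.2) : Int) 2

lemma pbit_lookup (x : Int) (h0 : 0 ≤ x) (h1 : x < 16) :
    PySem.List.pyGetD pbitT x 0 = PySem.Int.mod (PySem.Int.bitCount x : Int) 2 :=
  PySem.List.pyGetD_map_pyRange_of_nonneg _ 16 x 0 h0 h1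

lemma band_bounds (x y : Int) (h0 : 0 ≤ x) (h1 : x < 16) (hy : 0 ≤ y) :
    0 ≤ PySem.Int.band x y ∧ PySem.Int.band x y < 16 := by
  rw [PySem.Int.band_of_nonneg h0 hy]
  have := @Nat.and_le_left x.toNat y.toNat
  omega

-- the lat-table lookup at the reduced masks is A's count
lemma count_eq_lat (m : Int × Int) :
    ((PySem.List.pyRange 0 16 1).countP (condP m) : Int)
      = PySem.List.pyGetD (PySem.List.pyGetD latT (PySem.Int.mod m.1 16) []) (PySem.Int.mod m.2 16) 0 := by
  have ha0 : 0 ≤ PySem.Int.mod m.1 16 := PySem.Int.mod_nonneg m.1 (by norm_num)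
  have ha1 : PySem.Int.mod m.1 16 < 16 := PySem.Int.mod_lt m.1 (by norm_num)
  have hb0 : 0 ≤ PySem.Int.mod m.2 16 := PySem.Int.mod_nonneg m.2 (by norm_num)
  have hb1 : PySem.Int.mod m.2 16 < 16 := PySem.Int.mod_lt m.2 (by norm_num)
  unfold latT
  rw [PySem.List.pyGetD_map_pyRange_of_nonneg _ 16 _ [] ha0 ha1,
    PySem.List.pyGetD_map_pyRange_of_nonneg _ 16 _ 0 hb0 hb1,
    ← List.countP_eq_length_filter]
  norm_cast
  apply List.countP_congr
  intro j hj
  obtain ⟨hj0, hj1⟩ := PySem.List.mem_pyRange_one.mp hj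
  obtain ⟨hs0, hs1⟩ := sbox_range j hj0 hj1
  obtain ⟨hba0, hba1⟩ := band_bounds j (PySem.Int.mod m.1 16) hj0 hj1 ha0
  obtain ⟨hbb0, hbb1⟩ := band_bounds _ (PySem.Int.mod m.2 16) hs0 hs1 hb0
  rw [pbit_lookup _ hba0 hba1, pbit_lookup _ hbb0 hbb1,
    ← band_mod16 j m.1 hj0 hj1, ← band_mod16 _ m.2 hs0 hs1]
  exact Iff.rfl

-- the two loop bodies, named (definitionally equal to the lambdas inside the ports)
def stepInner (pm : List (Int × Int × Int)) (i : Int) : List Int → Int → List Int :=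
  fun res j =>
    if condP (pmGet pm i) j
    then PySem.List.pySetD res i (PySem.List.pyGetD res i 0 + 1)
    else res

def stepA (pm : List (Int × Int × Int)) : List Int → (Int × Int × Int) → List Int :=
  fun res kv => (PySem.List.pyRange 0 16 1).foldl (stepInner pm kv.1) (res ++ [(0 : Int)])

def stepB (pm : List (Int × Int × Int)) : List Int → (Int × Int × Int) → List Int :=
  fun res kv =>
    PySem.List.pySetD (res ++ [(0 : Int)]) kv.1
      (PySem.List.pyGetD (res ++ [(0 : Int)]) kv.1 0 +
        PySem.List.pyGetD (PySem.List.pyGetD latT (PySem.Int.mod (pmGet pm kv.1).1 16) [])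
          (PySem.Int.mod (pmGet pm kv.1).2 16) 0)

lemma loop_eq (pm : List (Int × Int × Int)) :
    ∀ (l : List (Int × Int × Int)) (res : List Int),
      (∀ t, (ht : t < l.length) → PySem.Raise.InRange (res.length + t + 1) (l[t].1)) →
      l.foldl (stepA pm) res = l.foldl (stepB pm) res := by
  intro l
  induction l with
  | nil => intro res _; rfl
  | cons kv l ih =>
    intro res h
    simp only [List.foldl_cons]
    have hkv : PySem.Raise.InRange (res ++ [(0 : Int)]).length kv.1 := by
      have := h 0 (by simp)
      simpa [Nat.add_comm] using this
    have hstep : stepA pm res kv = stepB pm res kv := by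
      unfold stepA stepB stepInner
      rw [foldl_count_set kv.1 (condP (pmGet pm kv.1)) _ _ hkv, count_eq_lat]
    rw [hstep]
    apply ih
    intro t ht
    have hlen : (stepB pm res kv).length = res.length + 1 := by
      unfold stepB
      simp [PySem.List.length_pySetD]
    rw [hlen]
    have := h (t + 1) (by simpa using Nat.succ_lt_succ ht)
    simpa [Nat.add_comm, Nat.add_assoc, Nat.add_left_comm] using this

-- ===== VERDICT (by name: the statement is the Claim_ definition above) =====
theorem parite_spec : Claim_equal_parite := by
  intro pm _hdom hpre
  unfold Spec_parite parite parite_alt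
  exact loop_eq pm pm [] (by simpa using hpre.2)
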